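-- pv_equiv track=rewrite | github.com/loociano/advent-of-code | aoc2019/src/day05/solution.py | _decode_opcode
-- ===== SOURCE A (Python) =====
-- def _decode_opcode(num: int) -> list:
--   digits = [0, 0, 0, 0, 0]
--   pos = len(digits) - 1
--   while num > 0 and pos >= 0:
--     digits[pos] = num % 10
--     num //= 10
--     pos -= 1
--   return digits
-- ===== SOURCE B (Python) =====
-- def _decode_opcode(num: int) -> list:
--   m = max(num, 0)
--   return [m // 10 ** p % 10 for p in range(4, -1, -1)]
-- ===== Notes on version B (the rewrite author's own statement) =====
-- stated objective: simpler
-- what changed: Replaced the stateful while loop (threading a shrinking num and a moving index through a mutated five-slot list) with a stateless closed-form comprehension extracting each digit independently via a power-of-ten floor-divide and mod.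
import Mathlib
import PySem

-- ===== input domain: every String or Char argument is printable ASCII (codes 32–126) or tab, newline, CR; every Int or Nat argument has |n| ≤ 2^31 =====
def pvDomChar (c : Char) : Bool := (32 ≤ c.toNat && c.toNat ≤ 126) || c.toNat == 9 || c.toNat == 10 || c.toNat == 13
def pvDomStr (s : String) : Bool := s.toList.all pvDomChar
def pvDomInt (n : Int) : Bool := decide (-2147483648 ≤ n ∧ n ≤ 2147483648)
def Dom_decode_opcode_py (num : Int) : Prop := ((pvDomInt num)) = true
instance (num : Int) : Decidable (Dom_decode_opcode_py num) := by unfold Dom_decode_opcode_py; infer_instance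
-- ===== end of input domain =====

-- B replaces A's stateful while loop (threading a shrinking `num` and a moving index through a
-- mutated list) by a closed-form per-position extraction `(max(num,0) // 10**p) % 10`; objective: simpler.

-- ===== PORT A =====
-- the while loop, as recursion on a fuel of 5 (pos starts at 4 and strictly decreases, so 5
-- iterations are exact); `digits[pos] = …` is List.set at pos.toNat, exact since the loop body
-- only runs with pos ≥ 0 (and pos ≤ 4, within the list).
def pvLoopA : Nat → Int → Int → List Int → List Int
  | 0, _, _, digits => digits
  | f + 1, num, pos, digits =>
    if num > 0 ∧ pos ≥ 0 then
      pvLoopA f (PySem.Int.floordiv num 10) (pos - 1)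
        (digits.set pos.toNat (PySem.Int.mod num 10))
    else digits

def decode_opcode_py (num : Int) : List Int :=
  pvLoopA 5 num 4 [0, 0, 0, 0, 0]

-- ===== PORT B =====
-- `10 ** p` with p drawn from range(4,-1,-1), so p ∈ {4,…,0}: `10 ^ p.toNat` is exact there.
def decode_opcode_py_alt (num : Int) : List Int :=
  let m := max num 0
  (PySem.List.pyRange 4 (-1) (-1)).map
    (fun p => PySem.Int.mod (PySem.Int.floordiv m (10 ^ p.toNat)) 10)

-- ===== PRECONDITION & SPEC =====
def Spec_decode_opcode_py (num : Int) (out : List Int) : Prop := out = decode_opcode_py_alt num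
instance (num : Int) (out : List Int) : Decidable (Spec_decode_opcode_py num out) := by unfold Spec_decode_opcode_py; infer_instance

-- ===== CLAIM (what is proved, stated in full; the proofs are below) =====
def Claim_equal_decode_opcode_py : Prop := ∀ (num : Int), Dom_decode_opcode_py num → Spec_decode_opcode_py num (decode_opcode_py num)

-- ===== LEMMAS AND PROOFS =====

theorem pvRange_eval : PySem.List.pyRange 4 (-1) (-1) = [4, 3, 2, 1, 0] := by decide

theorem pvAlt_eval (num : Int) :
    decode_opcode_py_alt num =
      [PySem.Int.mod (PySem.Int.floordiv (max num 0) 10000) 10,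
       PySem.Int.mod (PySem.Int.floordiv (max num 0) 1000) 10,
       PySem.Int.mod (PySem.Int.floordiv (max num 0) 100) 10,
       PySem.Int.mod (PySem.Int.floordiv (max num 0) 10) 10,
       PySem.Int.mod (PySem.Int.floordiv (max num 0) 1) 10] := by
  simp [decode_opcode_py_alt, pvRange_eval]

-- ===== VERDICT (by name: the statement is the Claim_ definition above) =====
theorem decode_opcode_py_spec : Claim_equal_decode_opcode_py := by
  intro num _
  unfold Spec_decode_opcode_py
  rw [pvAlt_eval]
  by_cases h : 0 < num
  · have hm : max num 0 = num := by omega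
    rw [hm]
    simp only [decode_opcode_py, pvLoopA,
      PySem.Int.floordiv_eq_ediv_of_pos (show (0:Int) < 10 by norm_num),
      PySem.Int.floordiv_eq_ediv_of_pos (show (0:Int) < 10000 by norm_num),
      PySem.Int.floordiv_eq_ediv_of_pos (show (0:Int) < 1000 by norm_num),
      PySem.Int.floordiv_eq_ediv_of_pos (show (0:Int) < 100 by norm_num),
      PySem.Int.floordiv_eq_ediv_of_pos (show (0:Int) < 1 by norm_num),
      PySem.Int.mod_eq_emod_of_pos (show (0:Int) < 10 by norm_num)]
    split_ifs <;> simp_all [List.set] <;> omega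
  · have hm : max num 0 = 0 := by omega
    rw [hm]
    simp [decode_opcode_py, pvLoopA, h]
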